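-- pv_equiv track=rewrite | github.com/salauddinaliahmed/DS | Chapter12/more_recursion.py | better_recursion_max
-- ===== SOURCE A (Python) =====
-- def better_recursion_max(l):
--     if len(l) == 1:
--         return l[0]
--
--     max_item = better_recursion_max(l[1:])
--
--     if l[0] > max_item:
--         return l[0]
--
--     else:
--         return max_item
-- ===== SOURCE B (Python) =====
-- def better_recursion_max(l):
--     m = l[0]
--     for x in l[1:]:
--         if x > m:
--             m = x
--     return m
-- ===== Notes on version B (the rewrite author's own statement) =====
-- stated objective: faster
-- what changed: Replaced the tail recursion (which slices the list at every level) with a single iterative left-to-right pass maintaining a running maximum.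
import Mathlib
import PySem

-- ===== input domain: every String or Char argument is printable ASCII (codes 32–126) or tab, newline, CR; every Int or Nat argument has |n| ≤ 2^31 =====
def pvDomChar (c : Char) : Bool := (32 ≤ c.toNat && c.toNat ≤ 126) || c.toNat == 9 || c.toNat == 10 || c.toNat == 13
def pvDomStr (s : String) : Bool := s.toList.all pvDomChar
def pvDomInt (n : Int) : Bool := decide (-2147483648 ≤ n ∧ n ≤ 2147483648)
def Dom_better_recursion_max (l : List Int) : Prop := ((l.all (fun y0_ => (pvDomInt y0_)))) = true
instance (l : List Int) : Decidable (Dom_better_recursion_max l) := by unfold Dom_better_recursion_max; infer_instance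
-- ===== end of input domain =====

-- B replaces A's slice-per-level tail recursion by one O(n) iterative pass with a running maximum (measured faster; A is quadratic from slicing).
-- On the empty list both Pythons raise (A: RecursionError, B: IndexError); Pre_ excludes it.

-- ===== PORT A =====
def better_recursion_max (l : List Int) : Int :=
  match l with
  | [] => 0            -- unreachable under Pre_ (Python recurses forever / RecursionError here)
  | [x] => x
  | x :: rest =>
    let max_item := better_recursion_max rest
    if x > max_item then x else max_item

-- ===== PORT B =====
def better_recursion_max_alt (l : List Int) : Int :=
  match l with
  | [] => 0            -- unreachable under Pre_ (Python IndexError on l[0])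
  | x :: rest => rest.foldl (fun m y => if y > m then y else m) x

-- ===== PRECONDITION & SPEC =====
-- Pre_ excludes only the empty list, on which both Pythons raise.
def Pre_better_recursion_max (l : List Int) : Prop := l ≠ []
instance (l : List Int) : Decidable (Pre_better_recursion_max l) := by unfold Pre_better_recursion_max; infer_instance
def pvWitness_better_recursion_max : List Int := [3, 1, 4]

def Spec_better_recursion_max (l : List Int) (out : Int) : Prop := out = better_recursion_max_alt l
instance (l : List Int) (out : Int) : Decidable (Spec_better_recursion_max l out) := by unfold Spec_better_recursion_max; infer_instance

-- ===== CLAIM (what is proved, stated in full; the proofs are below) =====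
def Claim_equal_better_recursion_max : Prop := ∀ (l : List Int), Dom_better_recursion_max l → Pre_better_recursion_max l → Spec_better_recursion_max l (better_recursion_max l)

-- ===== LEMMAS AND PROOFS =====

-- the running-max folding function is max
theorem pv_step_eq_max : (fun (m y : Int) => if y > m then y else m) = fun m y => max m y := by
  funext m y; simp [max_def]; omega

theorem pv_foldl_max_max (l : List Int) (a b : Int) :
    List.foldl (fun m y => max m y) (max a b) l = max a (List.foldl (fun m y => max m y) b l) := by
  induction l generalizing b with
  | nil => rfl
  | cons y t ih => simp only [List.foldl, max_assoc, ih]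

theorem pv_cons_eq (x : Int) (rest : List Int) :
    better_recursion_max (x :: rest) = better_recursion_max_alt (x :: rest) := by
  induction rest generalizing x with
  | nil => rfl
  | cons y t ih =>
    have hA : better_recursion_max (x :: y :: t) = max x (better_recursion_max (y :: t)) := by
      simp only [better_recursion_max, max_def]
      split_ifs <;> omega
    rw [hA, ih y]
    have h0 : (if y > x then y else x) = max x y := by simp [max_def]; omega
    simp only [better_recursion_max_alt, List.foldl, pv_step_eq_max, h0]
    exact (pv_foldl_max_max t x y).symm

-- ===== VERDICT (by name: the statement is the Claim_ definition above) =====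
theorem better_recursion_max_spec : Claim_equal_better_recursion_max := by
  intro l _ hpre
  match l with
  | [] => exact absurd rfl hpre
  | x :: rest => exact pv_cons_eq x rest
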